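-- pv_equiv track=rewrite | github.com/raeez/chiral-bar-cobar | compute/lib/bps_wall_crossing_engine.py | euler_form
-- ===== SOURCE A (Python) =====
-- from typing import Any, Dict, FrozenSet, List, Optional, Sequence, Tuple
--
-- def euler_form(gamma1: Tuple[int, ...], gamma2: Tuple[int, ...]) -> int:
--     r"""Skew-symmetric Euler form on the charge lattice Z^r.
--
--     For r=2: <(a,b), (c,d)> = ad - bc  (standard symplectic form).
--     For general r: sum_{i<j} (gamma1[i]*gamma2[j] - gamma1[j]*gamma2[i]).
--     """
--     n = len(gamma1)
--     assert len(gamma2) == n, "Charge vectors must have equal dimension"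
--     if n == 2:
--         return gamma1[0] * gamma2[1] - gamma1[1] * gamma2[0]
--     total = 0
--     for i in range(n):
--         for j in range(i + 1, n):
--             total += gamma1[i] * gamma2[j] - gamma1[j] * gamma2[i]
--     return total
-- ===== SOURCE B (Python) =====
-- def euler_form(gamma1, gamma2):
--     """Skew-symmetric Euler form: single pass with running prefix sums (O(n))."""
--     n = len(gamma1)
--     assert len(gamma2) == n, "Charge vectors must have equal dimension"
--     prefix1 = prefix2 = total = 0
--     for x, y in zip(gamma1, gamma2):
--         total += prefix1 * y - prefix2 * x
--         prefix1 += x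
--         prefix2 += y
--     return total
-- ===== Notes on version B (the rewrite author's own statement) =====
-- stated objective: faster
-- what changed: Replaced the nested i<j double loop by a single pass that keeps running prefix sums of gamma1 and gamma2, adding prefix1*g2[j] - prefix2*g1[j] at each j.
import Mathlib
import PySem

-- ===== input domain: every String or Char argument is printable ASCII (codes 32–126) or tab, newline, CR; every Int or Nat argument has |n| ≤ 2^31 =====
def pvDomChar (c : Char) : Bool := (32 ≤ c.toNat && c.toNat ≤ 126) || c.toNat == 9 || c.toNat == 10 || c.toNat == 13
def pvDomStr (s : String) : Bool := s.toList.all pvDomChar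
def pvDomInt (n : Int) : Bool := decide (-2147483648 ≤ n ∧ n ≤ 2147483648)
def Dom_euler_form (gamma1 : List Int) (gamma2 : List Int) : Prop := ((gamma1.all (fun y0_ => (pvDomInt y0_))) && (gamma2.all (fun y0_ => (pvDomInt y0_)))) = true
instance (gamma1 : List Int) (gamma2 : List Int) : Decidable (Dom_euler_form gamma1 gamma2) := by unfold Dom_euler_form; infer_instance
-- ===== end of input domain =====

-- B replaces A's nested i<j double loop by a single O(n) pass keeping running prefix sums.


-- ===== PORT A =====
-- literal transliteration of A: nested loops over i in range(n), j in range(i+1, n)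
def euler_form (gamma1 : List Int) (gamma2 : List Int) : Int :=
  -- n = len(gamma1), inlined at its three use sites
  if (gamma1.length : Int) == 2 then
    PySem.List.pyGetD gamma1 0 0 * PySem.List.pyGetD gamma2 1 0 -
    PySem.List.pyGetD gamma1 1 0 * PySem.List.pyGetD gamma2 0 0
  else
    (PySem.List.pyRange 0 (gamma1.length : Int) 1).foldl (fun total i =>
      (PySem.List.pyRange (i + 1) (gamma1.length : Int) 1).foldl (fun total j =>
        total + (PySem.List.pyGetD gamma1 i 0 * PySem.List.pyGetD gamma2 j 0 -
                 PySem.List.pyGetD gamma1 j 0 * PySem.List.pyGetD gamma2 i 0)) total) 0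

-- ===== PORT B =====
-- state = (prefix1, prefix2, total); one pass over zip(gamma1, gamma2)
def eulerStep (s : Int × Int × Int) (xy : Int × Int) : Int × Int × Int :=
  (s.1 + xy.1, s.2.1 + xy.2, s.2.2 + s.1 * xy.2 - s.2.1 * xy.1)

def euler_form_alt (gamma1 : List Int) (gamma2 : List Int) : Int :=
  ((gamma1.zip gamma2).foldl eulerStep (0, 0, 0)).2.2

-- ===== PRECONDITION & SPEC =====
-- A asserts len(gamma2) == len(gamma1) (AssertionError otherwise), so unequal lengths are excluded.
def Pre_euler_form (gamma1 : List Int) (gamma2 : List Int) : Prop := gamma2.length = gamma1.length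
instance (gamma1 : List Int) (gamma2 : List Int) : Decidable (Pre_euler_form gamma1 gamma2) := by unfold Pre_euler_form; infer_instance
def pvWitness_euler_form : List Int × List Int := ([1, 2, 3], [4, 5, 6])

def Spec_euler_form (gamma1 : List Int) (gamma2 : List Int) (out : Int) : Prop := out = euler_form_alt gamma1 gamma2
instance (gamma1 : List Int) (gamma2 : List Int) (out : Int) : Decidable (Spec_euler_form gamma1 gamma2 out) := by unfold Spec_euler_form; infer_instance

-- ===== CLAIM (what is proved, stated in full; the proofs are below) =====
def Claim_equal_euler_form : Prop := ∀ (gamma1 : List Int) (gamma2 : List Int), Dom_euler_form gamma1 gamma2 → Pre_euler_form gamma1 gamma2 → Spec_euler_form gamma1 gamma2 (euler_form gamma1 gamma2)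

-- ===== LEMMAS AND PROOFS =====

-- canonical structural value: F (x::xs) (y::ys) = x * sum ys - y * sum xs + F xs ys
def eulerF : List Int → List Int → Int
  | [], _ => 0
  | _, [] => 0
  | x :: xs, y :: ys => x * ys.sum - y * xs.sum + eulerF xs ys

-- B's loop invariant
theorem alt_loop_eq (xs ys : List Int) (h : xs.length = ys.length) :
    ∀ p1 p2 t, ((xs.zip ys).foldl eulerStep (p1, p2, t)).2.2
      = t + p1 * ys.sum - p2 * xs.sum + eulerF xs ys := by
  induction xs generalizing ys with
  | nil => cases ys with
    | nil => intro p1 p2 t; simp [eulerF]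
    | cons y ys => simp at h
  | cons x xs ih => cases ys with
    | nil => simp at h
    | cons y ys =>
      intro p1 p2 t
      simp only [List.zip_cons_cons, List.foldl_cons, eulerStep]
      rw [ih ys (by simpa using h)]
      simp [eulerF, List.sum_cons]
      ring

theorem alt_eq_F (xs ys : List Int) (h : xs.length = ys.length) :
    euler_form_alt xs ys = eulerF xs ys := by
  unfold euler_form_alt
  rw [alt_loop_eq xs ys h 0 0 0]; ring

-- Σ over l of (c * f j - g j * d)
theorem sum_map_lin (l : List Int) (f g : Int → Int) (c d : Int) :
    (l.map (fun j => c * f j - g j * d)).sum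
      = c * (l.map f).sum - (l.map g).sum * d := by
  induction l with
  | nil => simp
  | cons a l ih => simp only [List.map_cons, List.sum_cons, ih]; ring

-- A's inner loop, reduced: the contribution of index i
def eulerT (xs ys : List Int) (i : Int) : Int :=
  PySem.List.pyGetD xs i 0 * ((ys.drop (i + 1).toNat).sum)
    - ((xs.drop (i + 1).toNat).sum) * PySem.List.pyGetD ys i 0

theorem inner_eq (xs ys : List Int) (h : ys.length = xs.length) (i : Int) (hi : 0 ≤ i) (t : Int) :
    (PySem.List.pyRange (i + 1) (xs.length : Int) 1).foldl (fun total j =>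
        total + (PySem.List.pyGetD xs i 0 * PySem.List.pyGetD ys j 0 -
                 PySem.List.pyGetD xs j 0 * PySem.List.pyGetD ys i 0)) t
      = t + eulerT xs ys i := by
  rw [PySem.List.foldl_add, sum_map_lin]
  rw [PySem.List.map_pyGetD_pyRange' xs 0 (a := i + 1) (by omega)]
  rw [show ((xs.length : Int)) = ((ys.length : Int)) by exact_mod_cast h.symm]
  rw [PySem.List.map_pyGetD_pyRange' ys 0 (a := i + 1) (by omega)]
  rfl

-- outer loop = sum of contributions
theorem outer_eq (xs ys : List Int) (h : ys.length = xs.length) :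
    (PySem.List.pyRange 0 (xs.length : Int) 1).foldl (fun total i =>
      (PySem.List.pyRange (i + 1) (xs.length : Int) 1).foldl (fun total j =>
        total + (PySem.List.pyGetD xs i 0 * PySem.List.pyGetD ys j 0 -
                 PySem.List.pyGetD xs j 0 * PySem.List.pyGetD ys i 0)) total) 0
      = ((PySem.List.pyRange 0 (xs.length : Int) 1).map (eulerT xs ys)).sum := by
  rw [PySem.List.foldl_congr_mem _ _ (fun total i => total + eulerT xs ys i) 0
      (by intro acc i hi
          have h0 : 0 ≤ i := (PySem.List.mem_pyRange_one.mp hi).1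
          exact inner_eq xs ys h i h0 acc)]
  rw [PySem.List.foldl_add]
  ring

-- shift the contribution of index k+1 on cons-lists to index k on the tails
theorem eulerT_shift (x y : Int) (xs ys : List Int) (k : Nat) :
    eulerT (x :: xs) (y :: ys) ((k : Int) + 1) = eulerT xs ys (k : Int) := by
  have e1 : ((k : Int) + 1) = ((k + 1 : Nat) : Int) := by push_cast; ring
  simp only [eulerT, e1, PySem.List.pyGetD_natCast]
  have e3 : (((k + 1 : Nat) : Int) + 1).toNat = (((k : Int)) + 1).toNat + 1 := by omega
  rw [e3]
  simp [List.getD]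

-- the Nat-indexed sum of contributions equals the structural F
theorem sum_T_eq_F (xs ys : List Int) (h : ys.length = xs.length) :
    ((List.range xs.length).map (fun k => eulerT xs ys (Int.ofNat k))).sum = eulerF xs ys := by
  induction xs generalizing ys with
  | nil => simp [eulerF]
  | cons x xs ih =>
    cases ys with
    | nil => simp at h
    | cons y ys =>
      have h' : ys.length = xs.length := by simpa using h
      rw [List.length_cons, List.range_succ_eq_map, List.map_cons, List.map_map, List.sum_cons]
      have hz : eulerT (x :: xs) (y :: ys) ((0 : Nat) : Int) = x * ys.sum - xs.sum * y := by
        simp [eulerT]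
      have hmap : (List.range xs.length).map ((fun (k : Nat) => eulerT (x :: xs) (y :: ys) (Int.ofNat k)) ∘ Nat.succ)
          = (List.range xs.length).map (fun k => eulerT xs ys (Int.ofNat k)) := by
        apply List.map_congr_left
        intro k _
        show eulerT (x :: xs) (y :: ys) (Int.ofNat (k + 1)) = eulerT xs ys (Int.ofNat k)
        rw [show (Int.ofNat (k + 1)) = (k : Int) + 1 by simp [Int.ofNat_eq_natCast]]
        rw [eulerT_shift x y xs ys k]
        simp [Int.ofNat_eq_natCast]
      rw [show ((0 : Nat) : Int) = Int.ofNat 0 from rfl] at *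
      rw [hmap, ih ys h', hz, eulerF]
      ring

-- pyRange-indexed sum = Nat-indexed sum
theorem sum_pyRange_eq (xs ys : List Int) :
    ((PySem.List.pyRange 0 (xs.length : Int) 1).map (eulerT xs ys)).sum
      = ((List.range xs.length).map (fun k => eulerT xs ys (Int.ofNat k))).sum := by
  rw [show PySem.List.pyRange 0 (xs.length : Int) 1 = PySem.List.pyRange 0 (xs.length : Int) from rfl]
  rw [PySem.List.pyRange_one, List.map_map,
      show (((xs.length : Int) - 0).toNat) = xs.length by omega]
  congr 1
  apply List.map_congr_left
  intro k _
  show eulerT xs ys (0 + (k : Int)) = eulerT xs ys (Int.ofNat k)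
  simp [Int.ofNat_eq_natCast]

-- ===== VERDICT (by name: the statement is the Claim_ definition above) =====
theorem euler_form_spec : Claim_equal_euler_form := by
  intro g1 g2 _ hpre
  unfold Spec_euler_form
  rw [alt_eq_F g1 g2 hpre.symm]
  unfold euler_form
  by_cases h2 : (g1.length : Int) = 2
  · simp only [h2, beq_self_eq_true, if_true]
    have hl1 : g1.length = 2 := by exact_mod_cast h2
    have hl2 : g2.length = 2 := by rw [hpre]; exact hl1
    obtain ⟨a, b, hg1⟩ : ∃ a b, g1 = [a, b] := by
      match g1, hl1 with
      | [a, b], _ => exact ⟨a, b, rfl⟩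
    obtain ⟨c, d, hg2⟩ : ∃ c d, g2 = [c, d] := by
      match g2, hl2 with
      | [c, d], _ => exact ⟨c, d, rfl⟩
    subst hg1 hg2
    simp [eulerF, PySem.List.pyGetD]
    ring
  · rw [show ((g1.length : Int) == 2) = false by simpa using h2]
    simp only [Bool.false_eq_true, if_false]
    rw [outer_eq g1 g2 hpre, sum_pyRange_eq, sum_T_eq_F g1 g2 hpre]
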